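-- pv_equiv track=rewrite | github.com/DonghyungKo/Fininsight | project/ko_text.py | extract_a_equally_splited_batch
-- ===== SOURCE A (Python) =====
-- def extract_a_equally_splited_batch(X_ls, Y_ls, size):
--
--     if type(X_ls) == list:
--         pass
--     else:
--         try: X_ls.tolist()
--         except: pass
--
--     if size == len(X_ls):
--         return X_ls,Y_ls
--
--     unique_y_ls = list(set(Y_ls))
--
--     temp_dict = {}
--
--     for x, y in zip(X_ls,Y_ls):
--         try: temp_dict[y] += [x]
--         except: temp_dict[y] = [x]
--
--
--     # 한 섹션별로 k개씩 뽑아서 하나의 batch를 만든다.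
--     k = size // len(unique_y_ls)
--
--     batch_X_ls = []
--     batch_y_ls = []
--
--     for key in temp_dict.keys():
--         try:
--             batch_X_ls += temp_dict[key][:k]
--             batch_y_ls += [key] * len(temp_dict[key][:k])
--         except:
--             batch_X_ls += temp_dict[key]
--             batch_y_ls += [key] * len(temp_dict[key])
--
--
--     return batch_X_ls, batch_y_ls
-- ===== SOURCE B (Python) =====
-- def extract_a_equally_splited_batch(X_ls, Y_ls, size):
--     if size == len(X_ls):
--         return X_ls, Y_ls
--
--     labels = list(dict.fromkeys(Y_ls))
--     k = size // len(labels)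
--
--     batch_X_ls = []
--     batch_y_ls = []
--     for label in labels:
--         xs = [x for x, y in zip(X_ls, Y_ls) if y == label][:k]
--         batch_X_ls += xs
--         batch_y_ls += [label] * len(xs)
--     return batch_X_ls, batch_y_ls
-- ===== Notes on version B (the rewrite author's own statement) =====
-- stated objective: simpler
-- what changed: B drops A's dead type-check and try/except machinery and replaces the grouping dict built in one pass with a direct per-label list comprehension over first-appearance-ordered labels (dict.fromkeys), extending the batch label by label.
import Mathlib
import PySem

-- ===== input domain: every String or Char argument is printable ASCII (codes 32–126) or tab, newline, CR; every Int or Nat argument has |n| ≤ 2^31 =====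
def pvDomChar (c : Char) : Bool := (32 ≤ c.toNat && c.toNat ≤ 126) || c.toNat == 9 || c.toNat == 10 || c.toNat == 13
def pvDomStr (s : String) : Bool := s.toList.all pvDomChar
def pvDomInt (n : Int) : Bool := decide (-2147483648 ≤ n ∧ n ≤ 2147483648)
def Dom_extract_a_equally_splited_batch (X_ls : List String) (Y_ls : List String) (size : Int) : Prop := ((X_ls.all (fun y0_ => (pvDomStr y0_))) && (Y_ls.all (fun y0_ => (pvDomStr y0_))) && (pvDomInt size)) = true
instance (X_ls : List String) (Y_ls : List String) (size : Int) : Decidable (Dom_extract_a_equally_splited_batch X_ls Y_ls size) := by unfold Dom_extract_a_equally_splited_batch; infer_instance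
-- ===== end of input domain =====

-- B drops A's dead type-check / try-excepts and replaces the one-pass grouping dict with a
-- per-label filter over dedup-ordered labels (simpler; not claimed faster).

-- ===== PORT A =====
-- literal port of A: the initial type(X_ls)==list / .tolist() block has no effect on a list input;
-- 'try: temp_dict[y] += [x] except: temp_dict[y] = [x]' is Dict.modify with default [];
-- the try/except around the slicing never fires (slicing never raises), so the try-body alone is ported.
def extract_a_equally_splited_batch (X_ls : List String) (Y_ls : List String) (size : Int) : List String × List String :=
  if size = (X_ls.length : Int) then (X_ls, Y_ls)
  else
    let unique_y_ls : PySem.Set String := PySem.Set.ofList Y_ls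
    let temp_dict : PySem.Dict String (List String) :=
      (X_ls.zip Y_ls).foldl (fun d p => d.modify p.2 [] (fun v => v ++ [p.1])) PySem.Dict.empty
    let k : Int := PySem.Int.floordiv size (PySem.Set.len unique_y_ls)
    temp_dict.keys.foldl (fun acc key =>
      (acc.1 ++ PySem.List.slice (temp_dict.getD key []) none (some k),
       acc.2 ++ List.replicate (PySem.List.slice (temp_dict.getD key []) none (some k)).length key))
      ([], [])

-- ===== PORT B =====
def extract_a_equally_splited_batch_alt (X_ls : List String) (Y_ls : List String) (size : Int) : List String × List String :=
  if size = (X_ls.length : Int) then (X_ls, Y_ls)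
  else
    let labels : List String := PySem.List.dedup Y_ls
    let k : Int := PySem.Int.floordiv size (labels.length : Int)
    labels.foldl (fun acc label =>
      let xs := PySem.List.slice (((X_ls.zip Y_ls).filter (fun p => p.2 == label)).map (fun p => p.1)) none (some k)
      (acc.1 ++ xs, acc.2 ++ List.replicate xs.length label))
      ([], [])

-- ===== PRECONDITION & SPEC =====
-- Pre_ excludes exactly the inputs on which A raises: empty Y_ls without the size == len(X_ls)
-- early return makes 'size // len(unique_y_ls)' a ZeroDivisionError (B raises there too).
def Pre_extract_a_equally_splited_batch (X_ls : List String) (Y_ls : List String) (size : Int) : Prop :=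
  size = (X_ls.length : Int) ∨ Y_ls ≠ []
instance (X_ls : List String) (Y_ls : List String) (size : Int) : Decidable (Pre_extract_a_equally_splited_batch X_ls Y_ls size) := by unfold Pre_extract_a_equally_splited_batch; infer_instance

def pvWitness_extract_a_equally_splited_batch : List String × List String × Int :=
  (["a", "b", "c"], ["p", "q", "p"], 2)

def Spec_extract_a_equally_splited_batch (X_ls : List String) (Y_ls : List String) (size : Int) (out : List String × List String) : Prop := out = extract_a_equally_splited_batch_alt X_ls Y_ls size
instance (X_ls : List String) (Y_ls : List String) (size : Int) (out : List String × List String) : Decidable (Spec_extract_a_equally_splited_batch X_ls Y_ls size out) := by unfold Spec_extract_a_equally_splited_batch; infer_instance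

-- ===== CLAIM (what is proved, stated in full; the proofs are below) =====
def Claim_equal_extract_a_equally_splited_batch : Prop := ∀ (X_ls : List String) (Y_ls : List String) (size : Int), Dom_extract_a_equally_splited_batch X_ls Y_ls size → Pre_extract_a_equally_splited_batch X_ls Y_ls size → Spec_extract_a_equally_splited_batch X_ls Y_ls size (extract_a_equally_splited_batch X_ls Y_ls size)

-- ===== LEMMAS AND PROOFS =====

-- a fold appending (f x, g x) componentwise is a pair of flatMaps
theorem pv_foldl_pair {α β : Type} (L : List α) (f g : α → List β) (a b : List β) :
    L.foldl (fun acc x => (acc.1 ++ f x, acc.2 ++ g x)) (a, b) = (a ++ L.flatMap f, b ++ L.flatMap g) := by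
  induction L generalizing a b with
  | nil => simp
  | cons x L ih => simp [List.foldl_cons, ih]

-- Set.update only appends elements not already present
theorem pv_update_append {α : Type} [BEq α] [LawfulBEq α] (l : List α) (s : PySem.Set α) :
    ∃ t, PySem.Set.update s l = s ++ t ∧ ∀ x ∈ t, x ∉ s := by
  induction l generalizing s with
  | nil => exact ⟨[], by simp [PySem.Set.update], by simp⟩
  | cons a l ih =>
    have hupd : PySem.Set.update s (a :: l) = PySem.Set.update (PySem.Set.add s a) l := rfl
    by_cases h : a ∈ s
    · have : PySem.Set.add s a = s := by simp [PySem.Set.add, PySem.Set.contains, h]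
      rw [hupd, this]; exact ih s
    · have hadd : PySem.Set.add s a = s ++ [a] := by simp [PySem.Set.add, PySem.Set.contains, h]
      obtain ⟨t, ht, hm⟩ := ih (s ++ [a])
      refine ⟨a :: t, by rw [hupd, hadd] at *; simpa using ht, ?_⟩
      intro x hx hxs
      rcases hx with _ | hx
      · exact h hxs
      · exact hm x (by assumption) (by simp [hxs])

-- the grouping dict's value at any key c is the x's paired with c, in order
theorem pv_getD_group (Z : List (String × String)) (c : String) :
    ((Z.foldl (fun d p => d.modify p.2 [] (fun v => v ++ [p.1])) PySem.Dict.empty).getD c [])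
      = (Z.filter (fun p => p.2 == c)).map (fun p => p.1) := by
  have h := PySem.Dict.getD_foldl_modify_append (Z.map (fun p => (p.2, p.1)))
      (PySem.Dict.empty : PySem.Dict String (List String)) c
  rw [List.foldl_map] at h
  simpa [List.filter_map, Function.comp] using h

-- the grouping dict's keys are the distinct zipped labels in first-appearance order
theorem pv_keys_group (Z : List (String × String)) :
    ((Z.foldl (fun d p => d.modify p.2 [] (fun v => v ++ [p.1])) PySem.Dict.empty).keys)
      = PySem.Set.ofList (Z.map (fun p => p.2)) := by
  have h := PySem.Dict.keys_foldl_modify_key (ν := List String) Z (fun p => p.2) []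
      (fun _ p => (fun v => v ++ [p.1])) PySem.Dict.empty
  simpa using h

theorem pv_slice_nil (a b : Option Int) : PySem.List.slice ([] : List String) a b = [] := by
  simp [PySem.List.slice]

-- the distinct labels of Y are the distinct zipped labels followed by labels with no zipped pair
theorem pv_labels_split (X Y : List String) :
    ∃ t, PySem.Set.ofList Y = PySem.Set.ofList ((X.zip Y).map (fun p => p.2)) ++ t ∧
      ∀ x ∈ t, (X.zip Y).filter (fun p => p.2 == x) = [] := by
  have hzip : (X.zip Y).map (fun p => p.2) = Y.take X.length := by
    induction X generalizing Y with
    | nil => simp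
    | cons x X ih => cases Y with
      | nil => simp
      | cons y Y => simp [ih]
  have hup : PySem.Set.ofList Y =
      PySem.Set.update (PySem.Set.ofList (Y.take X.length)) (Y.drop X.length) := by
    conv_lhs => rw [← List.take_append_drop X.length Y]
    rw [PySem.Set.ofList_eq_foldl, PySem.Set.ofList_eq_foldl, List.foldl_append]
    rfl
  obtain ⟨t, ht, hm⟩ := pv_update_append (Y.drop X.length) (PySem.Set.ofList (Y.take X.length))
  refine ⟨t, by rw [hup, ht, hzip], ?_⟩
  intro x hx
  have hxn : x ∉ Y.take X.length := by
    intro hmem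
    exact hm x hx ((PySem.Set.mem_ofList _ _).mpr hmem)
  rw [List.filter_eq_nil_iff]
  intro p hp
  have : p.2 ∈ Y.take X.length := by
    rw [← hzip]; exact List.mem_map_of_mem hp
  simp only [beq_iff_eq]
  intro h; exact hxn (h ▸ this)

-- ===== VERDICT (by name: the statement is the Claim_ definition above) =====
theorem extract_a_equally_splited_batch_spec : Claim_equal_extract_a_equally_splited_batch := by
  intro X Y size _ _
  unfold Spec_extract_a_equally_splited_batch
  unfold extract_a_equally_splited_batch extract_a_equally_splited_batch_alt
  by_cases hsz : size = (X.length : Int)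
  · simp [hsz]
  · simp only [hsz, if_false]
    set Z := X.zip Y with hZ
    set k : Int := PySem.Int.floordiv size (PySem.Set.len (PySem.Set.ofList Y)) with hk
    have hklen : PySem.Int.floordiv size (((PySem.List.dedup Y).length : Nat) : Int) = k := by
      simp [hk, PySem.Set.len, PySem.List.dedup_eq_ofList]
    set f : String → List String :=
      fun c => PySem.List.slice ((Z.filter (fun p => p.2 == c)).map (fun p => p.1)) none (some k) with hf
    set g : String → List String := fun c => List.replicate (f c).length c with hg
    -- A's fold
    have hkeys := pv_keys_group Z
    have hA :
        ((Z.foldl (fun d p => d.modify p.2 [] (fun v => v ++ [p.1])) PySem.Dict.empty).keys).foldl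
          (fun acc key =>
            (acc.1 ++ PySem.List.slice ((Z.foldl (fun d p => d.modify p.2 [] (fun v => v ++ [p.1])) PySem.Dict.empty).getD key []) none (some k),
             acc.2 ++ List.replicate (PySem.List.slice ((Z.foldl (fun d p => d.modify p.2 [] (fun v => v ++ [p.1])) PySem.Dict.empty).getD key []) none (some k)).length key))
          ([], [])
        = ((PySem.Set.ofList (Z.map (fun p => p.2))).flatMap f,
           (PySem.Set.ofList (Z.map (fun p => p.2))).flatMap g) := by
      rw [hkeys]
      have : ∀ (c : String),
          PySem.List.slice ((Z.foldl (fun d p => d.modify p.2 [] (fun v => v ++ [p.1])) PySem.Dict.empty).getD c []) none (some k) = f c := by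
        intro c; rw [pv_getD_group]
      rw [PySem.List.foldl_congr_mem _ _ (fun acc c => (acc.1 ++ f c, acc.2 ++ g c)) _
            (by intro acc c _; rw [this c])]
      simp [pv_foldl_pair]
    rw [hA]
    -- B's fold
    have hB :
        (PySem.List.dedup Y).foldl
          (fun acc label =>
            (acc.1 ++ PySem.List.slice ((Z.filter (fun p => p.2 == label)).map (fun p => p.1)) none
              (some (PySem.Int.floordiv size (((PySem.List.dedup Y).length : Nat) : Int))),
             acc.2 ++ List.replicate (PySem.List.slice ((Z.filter (fun p => p.2 == label)).map (fun p => p.1)) none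
              (some (PySem.Int.floordiv size (((PySem.List.dedup Y).length : Nat) : Int)))).length label))
          ([], [])
        = ((PySem.List.dedup Y).flatMap f, (PySem.List.dedup Y).flatMap g) := by
      rw [hklen]
      rw [show (fun (acc : List String × List String) label =>
            (acc.1 ++ PySem.List.slice ((Z.filter (fun p => p.2 == label)).map (fun p => p.1)) none (some k),
             acc.2 ++ List.replicate (PySem.List.slice ((Z.filter (fun p => p.2 == label)).map (fun p => p.1)) none (some k)).length label))
          = (fun acc c => (acc.1 ++ f c, acc.2 ++ g c)) from rfl]
      rw [pv_foldl_pair]; simp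
    rw [hB]
    -- relate the two label lists: dedup Y = (distinct zipped labels) ++ extras with empty groups
    obtain ⟨t, ht, hte⟩ := pv_labels_split X Y
    have hD : PySem.List.dedup Y = PySem.Set.ofList (Z.map (fun p => p.2)) ++ t := by
      rw [PySem.List.dedup_eq_ofList]; exact ht
    have hft : ∀ x ∈ t, f x = [] := by
      intro x hx; simp only [hf]; rw [hte x hx]; simp [pv_slice_nil]
    have hgt : ∀ x ∈ t, g x = [] := by
      intro x hx; simp only [hg]; rw [hft x hx]; simp
    rw [hD]
    simp only [List.flatMap_append, Prod.mk.injEq]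
    constructor
    · rw [List.flatMap_eq_nil_iff.mpr hft, List.append_nil]
    · rw [List.flatMap_eq_nil_iff.mpr hgt, List.append_nil]
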